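-- pv_equiv track=rewrite | github.com/HicaroD/coq_nvim | rplugin/python3/fast_comp/completion.py | p_alnums
-- ===== SOURCE A (Python) =====
-- from itertools import chain
-- from typing import (
--     Awaitable,
--     Callable,
--     Dict,
--     Iterator,
--     List,
--     Optional,
--     Sequence,
--     Tuple,
--     cast,
-- )
--
-- def p_alnums(prefix: str, suffix: str) -> str:
--     def p1() -> Iterator[str]:
--         for c in reversed(prefix):
--             if c.isalnum():
--                 yield c
--             else:
--                 break
--
--     def p2() -> Iterator[str]:
--         for c in suffix:
--             if c.isalnum():
--                 yield c
--             else: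
--                 break
--
--     return "".join(chain(reversed(tuple(p1())), p2()))
-- ===== SOURCE B (Python) =====
-- def p_alnums(prefix: str, suffix: str) -> str:
--     i = len(prefix)
--     while i > 0 and prefix[i - 1].isalnum():
--         i -= 1
--     j = 0
--     while j < len(suffix) and suffix[j].isalnum():
--         j += 1
--     return prefix[i:] + suffix[:j]
-- ===== Notes on version B (the rewrite author's own statement) =====
-- stated objective: simpler
-- what changed: Replaces the two generators, tuple/reversed materialisation and itertools.chain join with two index scans that find the run boundaries and a direct slice-and-concatenate.
import Mathlib
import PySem

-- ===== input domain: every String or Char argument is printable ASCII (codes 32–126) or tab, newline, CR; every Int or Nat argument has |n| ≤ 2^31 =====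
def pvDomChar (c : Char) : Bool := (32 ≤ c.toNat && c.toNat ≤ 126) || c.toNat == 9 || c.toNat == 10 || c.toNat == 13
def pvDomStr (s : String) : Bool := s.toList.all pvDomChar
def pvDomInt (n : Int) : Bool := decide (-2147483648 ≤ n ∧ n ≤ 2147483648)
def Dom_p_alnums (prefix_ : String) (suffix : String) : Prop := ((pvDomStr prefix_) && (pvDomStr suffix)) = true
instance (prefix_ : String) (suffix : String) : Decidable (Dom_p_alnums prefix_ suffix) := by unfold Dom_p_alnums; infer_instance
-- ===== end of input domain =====

-- B replaces A's two generators + reversed tuple + itertools.chain join with two index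
-- scans for the run boundaries and a direct slice-and-concatenate (simpler decomposition).

-- ===== PORT A =====
-- p1: walk reversed(prefix), yielding while isalnum, break otherwise = takeWhile on the reversed chars;
-- the result is materialised, reversed back and joined with p2 (takeWhile on suffix).
def p_alnums (prefix_ : String) (suffix : String) : String :=
  let p1 : List Char := (prefix_.toList.reverse).takeWhile PySem.Chars.isalnum
  let p2 : List Char := suffix.toList.takeWhile PySem.Chars.isalnum
  String.ofList (p1.reverse ++ p2)

-- ===== PORT B =====
-- while i > 0 and prefix[i-1].isalnum(): i -= 1   (i always stays ≤ length, so getD is exact)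
def pvScanBack (cs : List Char) : Nat → Nat
  | 0 => 0
  | (i + 1) => if PySem.Chars.isalnum (cs.getD i default) then pvScanBack cs i else i + 1

-- while j < len(suffix) and suffix[j].isalnum(): j += 1
def pvScanFwd (cs : List Char) (j : Nat) : Nat :=
  if h : j < cs.length then
    if PySem.Chars.isalnum cs[j] then pvScanFwd cs (j + 1) else j
  else j
termination_by cs.length - j

def p_alnums_alt (prefix_ : String) (suffix : String) : String :=
  let pc := prefix_.toList
  let sc := suffix.toList
  let i := pvScanBack pc pc.length
  let j := pvScanFwd sc 0
  String.ofList (pc.drop i ++ sc.take j)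

-- ===== PRECONDITION & SPEC =====
def Spec_p_alnums (prefix_ : String) (suffix : String) (out : String) : Prop := out = p_alnums_alt prefix_ suffix
instance (prefix_ : String) (suffix : String) (out : String) : Decidable (Spec_p_alnums prefix_ suffix out) := by unfold Spec_p_alnums; infer_instance

-- ===== CLAIM (what is proved, stated in full; the proofs are below) =====
def Claim_equal_p_alnums : Prop := ∀ (prefix_ : String) (suffix : String), Dom_p_alnums prefix_ suffix → Spec_p_alnums prefix_ suffix (p_alnums prefix_ suffix)

-- ===== LEMMAS AND PROOFS =====

theorem pvScanBack_drop (cs : List Char) (i : Nat) (hi : i ≤ cs.length) :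
    cs.drop (pvScanBack cs i) =
      ((cs.take i).reverse.takeWhile PySem.Chars.isalnum).reverse ++ cs.drop i := by
  induction i with
  | zero => simp [pvScanBack]
  | succ n ih =>
    have hn : n < cs.length := hi
    have htake : cs.take (n + 1) = cs.take n ++ [cs[n]] :=
      List.take_succ_eq_append_getElem hn
    have hdrop : cs.drop n = cs[n] :: cs.drop (n + 1) :=
      (List.drop_eq_getElem_cons hn)
    have hget : cs.getD n default = cs[n] := by
      simp [List.getD, List.getElem?_eq_getElem hn]
    by_cases hp : PySem.Chars.isalnum cs[n] = true
    · rw [pvScanBack, hget, if_pos hp, ih (Nat.le_of_lt hn), htake, List.reverse_append,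
        List.reverse_singleton, List.singleton_append, List.takeWhile_cons_of_pos hp,
        List.reverse_cons, List.append_assoc, List.singleton_append, ← hdrop]
    · rw [pvScanBack, hget, if_neg hp, htake, List.reverse_append, List.reverse_singleton,
        List.singleton_append, List.takeWhile_cons_of_neg (by simp [hp]), List.reverse_nil,
        List.nil_append]

theorem pvScanFwd_take (cs : List Char) (j : Nat) :
    cs.take (pvScanFwd cs j) = cs.take j ++ (cs.drop j).takeWhile PySem.Chars.isalnum := by
  by_cases h : j < cs.length
  · have hdrop : cs.drop j = cs[j] :: cs.drop (j + 1) := (List.drop_eq_getElem_cons h)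
    by_cases hp : PySem.Chars.isalnum cs[j] = true
    · have htake : cs.take (j + 1) = cs.take j ++ [cs[j]] :=
        List.take_succ_eq_append_getElem h
      rw [pvScanFwd, dif_pos h, if_pos hp, pvScanFwd_take cs (j + 1), htake, hdrop,
        List.takeWhile_cons_of_pos hp, List.append_assoc, List.singleton_append]
    · rw [pvScanFwd, dif_pos h, if_neg hp, hdrop,
        List.takeWhile_cons_of_neg (by simp [hp])]
      simp
  · rw [pvScanFwd, dif_neg h]
    have : cs.drop j = [] := List.drop_eq_nil_of_le (Nat.le_of_not_lt h)
    simp [this]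
termination_by cs.length - j

-- ===== VERDICT (by name: the statement is the Claim_ definition above) =====
theorem p_alnums_spec : Claim_equal_p_alnums := by
  intro prefix_ suffix _
  show _ = _
  unfold p_alnums p_alnums_alt
  have hb := pvScanBack_drop prefix_.toList prefix_.toList.length (le_refl _)
  have hf := pvScanFwd_take suffix.toList 0
  simp only [List.take_length, List.drop_length, List.append_nil] at hb
  simp only [List.take_zero, List.drop_zero, List.nil_append] at hf
  simp only [String.length_toList] at hb
  simp [hb, hf]
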